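-- pv_equiv track=rewrite | github.com/laster13/stream-fusion | stream_fusion/services/postgresql/dao/torrentgroup_dao.py | _cluster_by_size
-- ===== SOURCE A (Python) =====
-- def _cluster_by_size(items: list[dict], max_diff: int = 524288) -> list[list[dict]]:
--     """Group items into clusters where all sizes are within *max_diff* bytes of each other.
--
--     Uses a greedy single-linkage approach: items are sorted by size and collected
--     into a cluster as long as the new item is within *max_diff* bytes of the
--     cluster's first item (the smallest, since the list is sorted).
--
--     Default tolerance: 512 KB — enough to cover the presence/absence of an NFO
--     while being far too small to confuse different encodes.
--     """
--     if not items: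
--         return []
--
--     sorted_items = sorted(items, key=lambda x: x["size"])
--     clusters: list[list[dict]] = []
--     current: list[dict] = [sorted_items[0]]
--
--     for item in sorted_items[1:]:
--         base_size = current[0]["size"]
--         if abs(item["size"] - base_size) <= max_diff:
--             current.append(item)
--         else:
--             clusters.append(current)
--             current = [item]
--
--     clusters.append(current)
--     return clusters
-- ===== SOURCE B (Python) =====
-- from bisect import bisect_right
--
--
-- def _cluster_by_size(items: list[dict], max_diff: int = 524288) -> list[list[dict]]:
--     """Group items into size clusters: sort once, then locate each cluster's
--     right edge with a binary search instead of scanning item by item."""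
--     s = sorted(items, key=lambda x: x["size"])
--     sizes = [d["size"] for d in s]
--     clusters: list[list[dict]] = []
--     i, n = 0, len(s)
--     while i < n:
--         # the first remaining item always starts the cluster; everything with
--         # size <= sizes[i] + max_diff belongs to it (list is sorted)
--         j = bisect_right(sizes, sizes[i] + max_diff, i + 1)
--         clusters.append(s[i:j])
--         i = j
--     return clusters
-- ===== Notes on version B (the rewrite author's own statement) =====
-- stated objective: alternative
-- what changed: A scans the sorted list item by item, growing the current cluster and comparing each item against the cluster's first element; B computes the size list once and locates each cluster's right edge with one bisect_right binary search per cluster, emitting the cluster as a single slice.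
import Mathlib
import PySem

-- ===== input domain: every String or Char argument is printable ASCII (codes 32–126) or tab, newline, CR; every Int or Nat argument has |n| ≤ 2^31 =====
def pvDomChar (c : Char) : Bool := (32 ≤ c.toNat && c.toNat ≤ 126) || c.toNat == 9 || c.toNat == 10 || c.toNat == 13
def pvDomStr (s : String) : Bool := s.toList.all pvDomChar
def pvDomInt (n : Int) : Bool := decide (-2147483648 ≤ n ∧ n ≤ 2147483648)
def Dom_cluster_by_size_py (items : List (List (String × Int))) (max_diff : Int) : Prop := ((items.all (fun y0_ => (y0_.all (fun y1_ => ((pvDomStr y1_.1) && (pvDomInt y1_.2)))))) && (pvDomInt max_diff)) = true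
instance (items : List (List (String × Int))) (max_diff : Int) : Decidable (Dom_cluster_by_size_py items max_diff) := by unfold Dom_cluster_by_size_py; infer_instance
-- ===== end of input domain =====

-- B replaces A's element-by-element greedy scan by one binary search (bisect_right) per
-- cluster on the sorted size list, slicing each cluster out in one step (objective: alternative).

-- d["size"] (both Pythons); the default 0 is never reached under Pre_ (every item carries "size")
def pvSz (d : List (String × Int)) : Int := (PySem.Dict.mk d).getD "size" 0

-- ===== PORT A =====
def pvStepA (md : Int)
    (acc : List (List (List (String × Int))) × List (List (String × Int)))
    (item : List (String × Int)) :
    List (List (List (String × Int))) × List (List (String × Int)) :=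
  let base := pvSz (acc.2.headD [])
  if |pvSz item - base| ≤ md then (acc.1, acc.2 ++ [item])
  else (acc.1 ++ [acc.2], [item])

def cluster_by_size_py (items : List (List (String × Int))) (max_diff : Int) :
    List (List (List (String × Int))) :=
  if items = [] then []
  else
    match PySem.List.sorted items pvSz with
    | [] => []
    | h :: t =>
      let r := t.foldl (pvStepA max_diff) ([], [h])
      r.1 ++ [r.2]

-- ===== PORT B =====
-- bisect.bisect_right(sizes, x, lo): on a sorted list (and sizes, the key list of a sorted
-- list, is sorted in every call B makes) this equals max(lo, bisect_right(sizes, x)), which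
-- is how the lo argument is rendered here over PySem.List.bisectRight.
def pvBisectGo (s : List (List (String × Int))) (sizes : List Int) (md : Int) (i : Nat) :
    List (List (List (String × Int))) :=
  if _h : i < s.length then
    let j := max (i + 1) (PySem.List.bisectRight sizes (sizes.getD i 0 + md))
    PySem.List.slice s (some (i : Int)) (some (j : Int)) :: pvBisectGo s sizes md j
  else []
termination_by s.length - i
decreasing_by
  have : i + 1 ≤ max (i + 1) (PySem.List.bisectRight sizes (sizes.getD i 0 + md)) :=
    le_max_left _ _
  omega

def cluster_by_size_py_alt (items : List (List (String × Int))) (max_diff : Int) :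
    List (List (List (String × Int))) :=
  let s := PySem.List.sorted items pvSz
  pvBisectGo s (s.map pvSz) max_diff 0

-- ===== PRECONDITION & SPEC =====
-- Pre_ excludes items lacking a "size" key, on which Python A raises KeyError (inside sorted).
def Pre_cluster_by_size_py (items : List (List (String × Int))) (max_diff : Int) : Prop :=
  (items.all (fun d => d.any (fun p => p.1 == "size"))) = true
instance (items : List (List (String × Int))) (max_diff : Int) : Decidable (Pre_cluster_by_size_py items max_diff) := by unfold Pre_cluster_by_size_py; infer_instance

def pvWitness_cluster_by_size_py : (List (List (String × Int))) × Int :=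
  ([[("size", 1)], [("size", 3)], [("size", 10)]], 2)

def Spec_cluster_by_size_py (items : List (List (String × Int))) (max_diff : Int) (out : List (List (List (String × Int)))) : Prop := out = cluster_by_size_py_alt items max_diff
instance (items : List (List (String × Int))) (max_diff : Int) (out : List (List (List (String × Int)))) : Decidable (Spec_cluster_by_size_py items max_diff out) := by unfold Spec_cluster_by_size_py; infer_instance

-- ===== CLAIM (what is proved, stated in full; the proofs are below) =====
def Claim_equal_cluster_by_size_py : Prop := ∀ (items : List (List (String × Int))) (max_diff : Int), Dom_cluster_by_size_py items max_diff → Pre_cluster_by_size_py items max_diff → Spec_cluster_by_size_py items max_diff (cluster_by_size_py items max_diff)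

-- ===== LEMMAS AND PROOFS =====

-- A's cluster predicate, measured from the cluster's first item b
def pvP (md : Int) (b x : List (String × Int)) : Bool := decide (|pvSz x - pvSz b| ≤ md)
-- B's predicate on the sorted tail
def pvQ (md : Int) (b x : List (String × Int)) : Bool := decide (pvSz x ≤ pvSz b + md)

-- meaning of A's fold state: current cluster = b :: acc, b its first element
def pvConsume (md : Int) (b : List (String × Int)) (acc : List (List (String × Int)))
    (t : List (List (String × Int))) : List (List (List (String × Int))) :=
  match t with
  | [] => [b :: acc]
  | x :: xs =>
    if |pvSz x - pvSz b| ≤ md then pvConsume md b (acc ++ [x]) xs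
    else (b :: acc) :: pvConsume md x [] xs

-- the cluster list as repeated span from the head of the remainder
def pvSpan (md : Int) (b : List (String × Int)) (t : List (List (String × Int))) :
    List (List (List (String × Int))) :=
  (b :: t.takeWhile (pvP md b)) ::
    (match h : t.dropWhile (pvP md b) with
     | [] => []
     | y :: ys => pvSpan md y ys)
termination_by t.length
decreasing_by
  have := (List.dropWhile_sublist (p := pvP md b) (l := t)).length_le
  rw [h] at this
  simp at this ⊢
  omega

theorem pvFoldA_eq (md : Int) (t : List (List (String × Int)))
    (clusters : List (List (List (String × Int)))) (b : List (String × Int))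
    (acc : List (List (String × Int))) :
    (t.foldl (pvStepA md) (clusters, b :: acc)).1 ++ [(t.foldl (pvStepA md) (clusters, b :: acc)).2]
      = clusters ++ pvConsume md b acc t := by
  induction t generalizing clusters b acc with
  | nil => simp [pvConsume]
  | cons x xs ih =>
    simp only [List.foldl_cons, pvStepA, pvConsume]
    by_cases h : |pvSz x - pvSz b| ≤ md
    · simpa [h] using ih clusters b (acc ++ [x])
    · simpa [h] using ih (clusters ++ [b :: acc]) x []

theorem pvConsume_spec (md : Int) (b : List (String × Int)) :
    ∀ (t acc : List (List (String × Int))),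
    pvConsume md b acc t =
      (b :: (acc ++ t.takeWhile (pvP md b))) ::
        (match t.dropWhile (pvP md b) with
         | [] => []
         | y :: ys => pvConsume md y [] ys) := by
  intro t
  induction t with
  | nil => intro acc; simp [pvConsume]
  | cons x xs ih =>
    intro acc
    by_cases h : |pvSz x - pvSz b| ≤ md
    · rw [pvConsume, if_pos h, ih (acc ++ [x])]
      simp [pvP, h, List.takeWhile_cons, List.dropWhile_cons]
    · rw [pvConsume, if_neg h]
      simp [pvP, h, List.takeWhile_cons, List.dropWhile_cons]

theorem pvConsume_eq_span (md : Int) :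
    ∀ (n : Nat) (t : List (List (String × Int))) (b : List (String × Int)),
    t.length ≤ n → pvConsume md b [] t = pvSpan md b t := by
  intro n
  induction n with
  | zero =>
    intro t b hlen
    have ht : t = [] := List.eq_nil_of_length_eq_zero (Nat.le_zero.mp hlen)
    subst ht
    rw [pvSpan]
    simp [pvConsume]
  | succ n ih =>
    intro t b hlen
    rw [pvConsume_spec, pvSpan]
    simp only [List.nil_append]
    have hsub := (List.dropWhile_sublist (p := pvP md b) (l := t)).length_le
    congr 1
    split <;> split
    · rfl
    · next h1 _ _ h2 => rw [h1] at h2; cases h2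
    · next _ _ h1 h2 => rw [h2] at h1; cases h1
    · next y ys h1 y' ys' h2 =>
      rw [h1] at h2
      injection h2 with hy hys
      subst hy; subst hys
      rw [h1] at hsub
      simp only [List.length_cons] at hsub
      exact ih ys y (by omega)

-- elements of the takeWhile prefix satisfy p; the element just after it (if any) does not
theorem pvTakeWhile_getElem {α : Type} (p : α → Bool) :
    ∀ (l : List α),
      (∀ (m : Nat) (hm : m < (l.takeWhile p).length) (hl : m < l.length), p (l[m]'hl) = true) ∧
      (∀ (hl : (l.takeWhile p).length < l.length), p (l[(l.takeWhile p).length]'hl) = false) := by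
  intro l
  induction l with
  | nil => simp
  | cons x xs ih =>
    by_cases h : p x = true
    · refine ⟨?_, ?_⟩
      · intro m hm hl
        cases m with
        | zero => simpa using h
        | succ m =>
          simp only [List.takeWhile_cons, h, if_true, List.length_cons] at hm
          exact ih.1 m (by omega) (by simpa using hl)
      · intro hl
        simp only [List.takeWhile_cons, h, if_true, List.length_cons] at hl ⊢
        simpa using ih.2 (by omega)
    · simp only [Bool.not_eq_true] at h
      refine ⟨?_, ?_⟩
      · intro m hm
        simp [List.takeWhile_cons, h] at hm
      · intro hl
        simpa [List.takeWhile_cons, h] using h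

theorem pvTakeWhile_congr {α : Type} (p q : α → Bool) :
    ∀ (l : List α), (∀ x ∈ l, p x = q x) →
      l.takeWhile p = l.takeWhile q ∧ l.dropWhile p = l.dropWhile q := by
  intro l
  induction l with
  | nil => simp
  | cons x xs ih =>
    intro h
    have hx := h x (by simp)
    have ihx := ih (fun y hy => h y (by simp [hy]))
    constructor
    · simp [List.takeWhile_cons, hx, ihx.1]
    · simp only [List.dropWhile_cons, hx]
      split <;> simp [ihx.2]

-- take/drop at the takeWhile boundary
theorem pvTakeDrop {α : Type} (p : α → Bool) : ∀ (l : List α),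
    l.take (l.takeWhile p).length = l.takeWhile p ∧
    l.drop (l.takeWhile p).length = l.dropWhile p := by
  intro l
  induction l with
  | nil => simp
  | cons x xs ih =>
    by_cases h : p x
    · simp [List.takeWhile_cons, List.dropWhile_cons, h, ih.1, ih.2]
    · simp [List.takeWhile_cons, List.dropWhile_cons, h]

-- the binary-search index equals i+1 plus the length of the q-prefix of the tail
theorem pvBisect_index (md : Int) (s : List (List (String × Int)))
    (hs : s.Pairwise (fun a b => pvSz a ≤ pvSz b)) (i : Nat) (hi : i < s.length) :
    max (i + 1) (PySem.List.bisectRight (s.map pvSz) ((s.map pvSz).getD i 0 + md))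
      = i + 1 + ((s.drop (i + 1)).takeWhile (pvQ md (s[i]'hi))).length := by
  -- w m = the size at position m of s (0 past the end)
  set w : Nat → Int := fun m => (s.map pvSz).getD m 0 with hw
  have hwget : ∀ (j : Nat) (hj : j < (s.map pvSz).length), (s.map pvSz)[j]'hj = w j := by
    intro j hj
    rw [hw]
    simp only []
    rw [List.getD_eq_getElem?_getD, List.getElem?_eq_getElem hj]
    rfl
  have hmono : ((s.map pvSz)).Pairwise (· ≤ ·) := List.pairwise_map.mpr hs
  set b := s[i]'hi with hb
  set x := (s.map pvSz).getD i 0 + md with hx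
  set t := s.drop (i + 1) with ht
  have htlen : t.length = s.length - (i + 1) := by rw [ht]; simp
  have htw : ∀ (m : Nat) (hm : m < t.length), pvSz (t[m]'hm) = w (i + 1 + m) := by
    intro m hm
    have h1 : i + 1 + m < s.length := by omega
    have h2 : (i + 1) + m < (s.map pvSz).length := by simpa using h1
    rw [← hwget (i + 1 + m) h2]
    simp [ht, List.getElem_drop]
  have hxval : x = w i + md := by
    rw [hx, hw]
  have hbw : pvSz b = w i := by
    have h2 : i < (s.map pvSz).length := by simpa using hi
    rw [← hwget i h2, hb]
    simp
  set k := (t.takeWhile (pvQ md b)).length with hk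
  have hkt : k ≤ t.length := by rw [hk]; exact (List.takeWhile_sublist _).length_le
  obtain ⟨hle, hbelow, habove⟩ := PySem.List.bisectRight_spec (s.map pvSz) x hmono
  set r := PySem.List.bisectRight (s.map pvSz) x with hr0
  have hslen : (s.map pvSz).length = s.length := by simp
  have hbelow' : ∀ (j : Nat), j < s.length → j < r → w j ≤ x := by
    intro j h1 h2
    have := hbelow j (by omega) h2
    rwa [hwget j (by omega)] at this
  have habove' : ∀ (j : Nat), j < s.length → r ≤ j → x < w j := by
    intro j h1 h2
    have := habove j (by omega) h2
    rwa [hwget j (by omega)] at this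
  have hin : ∀ (m : Nat), m < k → w (i + 1 + m) ≤ x := by
    intro m hm
    have h0 := (pvTakeWhile_getElem (pvQ md b) t).1 m (hk ▸ hm) (by omega)
    simp only [pvQ, decide_eq_true_eq] at h0
    rw [htw m (by omega)] at h0
    rw [hxval, ← hbw]
    exact h0
  have hout : i + 1 + k < s.length → x < w (i + 1 + k) := by
    intro hlt
    have hkl : k < t.length := by omega
    have h0 := (pvTakeWhile_getElem (pvQ md b) t).2 (hk ▸ hkl)
    simp only [pvQ, decide_eq_false_iff_not, not_le] at h0
    rw [htw _ (hk ▸ hkl)] at h0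
    rw [← hk] at h0
    rw [hxval, ← hbw]
    exact h0
  rcases Nat.eq_zero_or_pos k with hk0 | hkpos
  · have hr_le : r ≤ i + 1 := by
      by_contra hcon
      push_neg at hcon
      have h1 : i + 1 < s.length := by omega
      have h2 := hbelow' (i + 1) h1 (by omega)
      have h3 := hout (by omega)
      rw [hk0] at h3
      simp only [Nat.add_zero] at h3
      omega
    omega
  · have hr_ge : i + 1 + k ≤ r := by
      by_contra hcon
      push_neg at hcon
      have h1 : i + k < s.length := by omega
      have h2 := habove' (i + k) h1 (by omega)
      have h3 := hin (k - 1) (by omega)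
      rw [show i + 1 + (k - 1) = i + k from by omega] at h3
      omega
    have hr_le : r ≤ i + 1 + k := by
      by_cases hlt : i + 1 + k < s.length
      · by_contra hcon
        push_neg at hcon
        have h2 := hbelow' (i + 1 + k) hlt (by omega)
        have h3 := hout hlt
        omega
      · omega
    omega

-- B's loop computes the span decomposition of the remaining suffix
theorem pvBisectGo_eq (md : Int) (s : List (List (String × Int)))
    (hs : s.Pairwise (fun a b => pvSz a ≤ pvSz b)) :
    ∀ (n i : Nat), s.length - i ≤ n →
    ∀ (b : List (String × Int)) (t : List (List (String × Int))), s.drop i = b :: t →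
    pvBisectGo s (s.map pvSz) md i = pvSpan md b t := by
  intro n
  induction n with
  | zero =>
    intro i hn b t hd
    have : s.length ≤ i := by omega
    rw [List.drop_eq_nil_of_le this] at hd
    exact absurd hd (by simp)
  | succ n ih =>
    intro i hn b t hd
    have hi : i < s.length := by
      by_contra hcon
      push_neg at hcon
      rw [List.drop_eq_nil_of_le hcon] at hd
      exact absurd hd (by simp)
    have hsib : s[i]'hi = b := by
      have h0 : (s.drop i)[0]'(by rw [hd]; simp) = s[i]'hi := by
        simp [List.getElem_drop]
      rw [← h0]
      simp [hd]
    have hdt : s.drop (i + 1) = t := by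
      have h0 : s.drop (i + 1) = (s.drop i).drop 1 := by rw [List.drop_drop]
      rw [h0, hd]
      simp
    -- b comes before every element of t in the sorted list
    have hble : ∀ x ∈ t, pvSz b ≤ pvSz x := by
      have hsubl : (b :: t).Pairwise (fun a c => pvSz a ≤ pvSz c) := by
        rw [← hd]; exact hs.sublist (List.drop_sublist i s)
      exact (List.pairwise_cons.mp hsubl).1
    have hpq : ∀ x ∈ t, pvQ md b x = pvP md b x := by
      intro x hx
      have := hble x hx
      simp only [pvQ, pvP]
      rw [decide_eq_decide, abs_of_nonneg (sub_nonneg.mpr this)]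
      omega
    have hcong := pvTakeWhile_congr (pvQ md b) (pvP md b) t hpq
    have hidx := pvBisect_index md s hs i hi
    rw [hsib, hdt] at hidx
    set k := (t.takeWhile (pvQ md b)).length with hk
    have hkt : k ≤ t.length := by rw [hk]; exact (List.takeWhile_sublist _).length_le
    have htlen : t.length = s.length - (i + 1) := by rw [← hdt]; simp
    have htake : t.take k = t.takeWhile (pvQ md b) := by
      rw [hk]; exact (pvTakeDrop _ t).1
    have hdropk : t.drop k = t.dropWhile (pvQ md b) := by
      rw [hk]; exact (pvTakeDrop _ t).2
    rw [pvBisectGo, dif_pos hi]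
    simp only [hidx]
    rw [pvSpan]
    congr 1
    · -- the slice is the head cluster
      rw [PySem.List.slice_natCast]
      rw [show i + 1 + k - i = k + 1 from by omega, hd, List.take_succ_cons]
      rw [htake, hcong.1]
    · -- the recursive call produces the tail clusters
      have hdj : s.drop (i + 1 + k) = t.dropWhile (pvP md b) := by
        rw [← hcong.2, ← hdropk, ← hdt, List.drop_drop]
      split
      · next hnil =>
        rw [hnil] at hdj
        rw [pvBisectGo, dif_neg]
        have := List.drop_eq_nil_iff.mp hdj
        omega
      · next y ys hcons =>
        rw [hcons] at hdj
        exact ih (i + 1 + k) (by omega) y ys hdj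

-- ===== VERDICT (by name: the statement is the Claim_ definition above) =====
theorem cluster_by_size_py_spec : Claim_equal_cluster_by_size_py := by
  intro items md _ _
  unfold Spec_cluster_by_size_py cluster_by_size_py cluster_by_size_py_alt
  have hs := PySem.List.sorted_pairwise (xs := items) (key := pvSz)
  by_cases hnil : items = []
  · subst hnil
    rw [if_pos rfl]
    have h0 : PySem.List.sorted ([] : List (List (String × Int))) pvSz = [] := rfl
    rw [h0, pvBisectGo]
    simp
  · rw [if_neg hnil]
    cases hsrt : PySem.List.sorted items pvSz with
    | nil =>
      have hperm := PySem.List.sorted_perm (xs := items) (key := pvSz) (rev := false)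
      rw [hsrt] at hperm
      exact absurd (List.perm_nil.mp hperm.symm) hnil
    | cons h t =>
      simp only []
      rw [pvFoldA_eq md t [] h []]
      rw [List.nil_append]
      rw [pvConsume_eq_span md t.length t h (le_refl _)]
      rw [hsrt] at hs
      exact (pvBisectGo_eq md (h :: t) hs (t.length + 1) 0 (by simp) h t (by simp)).symm
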